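-- pv_equiv track=rewrite | github.com/pypi-data/pypi-mirror-395 | packages/biosynth-tool/biosynth_tool-1.1.0.tar.gz/biosynth_tool-1.1.0/biosynth/utils/dna_utils.py | get_coding_and_non_coding_regions_positions
-- ===== SOURCE A (Python) =====
-- min_coding_region_length = 7 * 3  # start_codon_length + stop_codon_length + 5 codons length in the coding area
--
-- def get_coding_and_non_coding_regions_positions(seq):
--     """
--     Identifies coding regions in the DNA sequence and precomputes an array of codon positions.
--
--     Args:
--         seq (str): The DNA sequence to analyze.
--     Returns:
--         tuple: (codon_positions, coding_region_indexes)
--             - codon_positions: list of codon positions per base (0, 1, 2, 3, or -3)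
--             - coding_region_indexes: list of tuples indicating start and end of each coding region
--     """
--     start_codon = "ATG"
--     stop_codons = {"TAA", "TAG", "TGA"}
--
--     N = len(seq)
--     codon_positions = [0] * N  # Initialize all positions as non-coding (0)
--     coding_region_indexes = []
--
--     i = 0  # Pointer to traverse the sequence
--
--     while i < len(seq) - 2:
--         if seq[i:i + 3] == start_codon:
--             # Search for the nearest stop codon in the same reading frame
--             for j in range(i + 3, len(seq) - 2, 3):
--                 if seq[j:j + 3] in stop_codons:
--                     start_idx = i
--                     end_idx = j + 3  # Include the stop codon
--
--                     if end_idx - start_idx >= min_coding_region_length: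
--                         for k in range(start_idx, end_idx):
--                             codon_phase = ((k - start_idx) % 3) + 1
--                             if (k - start_idx) < 3 and codon_phase == 3:
--                                 # Only mark the third position of the **first start codon**
--                                 codon_positions[k] = -3
--                             else:
--                                 codon_positions[k] = codon_phase
--
--                         coding_region_indexes.append((start_idx, end_idx))
--                     i = end_idx  # Move the pointer past the coding region
--                     break
--             else:
--                 # No valid stop codon found in frame, treat rest as non-coding
--                 break
--         else:
--             i += 1
--
--     return codon_positions, coding_region_indexes
-- ===== SOURCE B (Python) =====
-- min_coding_region_length = 7 * 3
--
-- def get_coding_and_non_coding_regions_positions(seq):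
--     """Suffix-DP rewrite: a right-to-left pass precomputes, for every position,
--     the nearest in-frame stop codon at or after it, so region detection becomes
--     a single forward for-loop with no inner scan; marking is a separate pass."""
--     stop_codons = {"TAA", "TAG", "TGA"}
--     N = len(seq)
--
--     # Pass 1 (right to left): next_stop[p] = nearest stop-codon start q >= p
--     # with q == p (mod 3), or None.  Extra 3 slots so p+3 is always readable.
--     next_stop = [None] * (N + 3)
--     for p in range(N - 3, -1, -1):
--         if seq[p:p + 3] in stop_codons:
--             next_stop[p] = p
--         else:
--             next_stop[p] = next_stop[p + 3]
--
--     # Pass 2 (left to right): one flat loop, no inner search.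
--     regions = []
--     i = 0
--     for s in range(N - 2):
--         if s < i or seq[s:s + 3] != "ATG":
--             continue
--         q = next_stop[s + 3]
--         if q is None:
--             break  # unterminated ATG: rest is non-coding
--         e = q + 3
--         if e - s >= min_coding_region_length:
--             regions.append((s, e))
--         i = e
--
--     # Pass 3: marking.
--     codon_positions = [0] * N
--     for (s, e) in regions:
--         for k in range(s, e):
--             codon_positions[k] = (k - s) % 3 + 1
--         codon_positions[s + 2] = -3
--     return codon_positions, regions
-- ===== Notes on version B (the rewrite author's own statement) =====
-- stated objective: alternative
-- what changed: B replaces A's inner in-frame stop-codon scan with a right-to-left suffix DP table next_stop[p] (nearest in-frame stop at or after p), turning detection into a single flat forward loop with a skip threshold, and moves codon marking into a separate final pass over the collected regions.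
import Mathlib
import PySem

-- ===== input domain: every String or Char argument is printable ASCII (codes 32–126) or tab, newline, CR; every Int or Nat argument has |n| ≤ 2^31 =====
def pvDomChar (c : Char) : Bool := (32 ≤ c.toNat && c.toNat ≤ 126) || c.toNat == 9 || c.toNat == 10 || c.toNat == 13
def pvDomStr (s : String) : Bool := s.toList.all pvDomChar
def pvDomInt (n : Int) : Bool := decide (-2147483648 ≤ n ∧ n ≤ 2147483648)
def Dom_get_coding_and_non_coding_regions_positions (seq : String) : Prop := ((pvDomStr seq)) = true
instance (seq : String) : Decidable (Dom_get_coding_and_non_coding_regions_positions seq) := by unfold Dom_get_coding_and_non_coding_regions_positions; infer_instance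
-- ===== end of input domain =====

-- B replaces A's inner in-frame stop-codon scan with a right-to-left suffix table of
-- nearest in-frame stops, a single flat forward detection loop, and a separate marking
-- pass (objective: alternative — same O(n) cost, different algorithm).

-- seq[i:i+3] as both Pythons write it (shared literal expression)
def pvSlice3 (cs : List Char) (i : Nat) : List Char :=
  PySem.List.slice cs (some (i : Int)) (some ((i : Int) + 3))

-- the stop-codon set {"TAA","TAG","TGA"} (shared literal constant)
def pvStops : List (List Char) := [['T','A','A'], ['T','A','G'], ['T','G','A']]

-- ===== PORT A =====
-- A's inner 'for k in range(start_idx, end_idx): codon_positions[k] = …' loop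
def pvMarkA (cp : List Int) (s e : Nat) : List Int :=
  (List.range' s (e - s)).foldl (fun acc (k : Nat) =>
    let phase : Int := ((k : Int) - (s : Int)) % 3 + 1
    if k - s < 3 ∧ phase = 3 then acc.set k (-3) else acc.set k phase) cp

-- A's 'for j in range(i+3, len(seq)-2, 3): … break / else' stop-codon search
def pvFindStopA (cs : List Char) (j : Nat) : Option Nat :=
  if j + 2 < cs.length then
    if pvSlice3 cs j ∈ pvStops then some j else pvFindStopA cs (j + 3)
  else none
termination_by cs.length - j
decreasing_by omega

-- termination fact for the outer while loop (cited by pvLoopA's decreasing_by)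
theorem pvFindStopA_bounds (cs : List Char) (j0 j : Nat)
    (h : pvFindStopA cs j0 = some j) : j0 ≤ j ∧ j + 2 < cs.length ∧ (j - j0) % 3 = 0 := by
  fun_induction pvFindStopA cs j0 with
  | case1 j' h1 h2 => simp only [Option.some.injEq] at h; omega
  | case2 j' h1 h2 ih => have := ih h; omega
  | case3 j' h1 => simp at h

-- A's outer 'while i < len(seq) - 2' loop, threading codon_positions and the regions
def pvLoopA (cs : List Char) (cp : List Int) (regs : List (Int × Int)) (i : Nat) :
    List Int × List (Int × Int) :=
  if i + 2 < cs.length then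
    if pvSlice3 cs i = ['A','T','G'] then
      match hj : pvFindStopA cs (i + 3) with
      | some j =>
          if 21 ≤ (j + 3) - i then
            pvLoopA cs (pvMarkA cp i (j + 3)) (regs ++ [((i : Int), ((j + 3 : Nat) : Int))]) (j + 3)
          else
            pvLoopA cs cp regs (j + 3)
      | none => (cp, regs)
    else pvLoopA cs cp regs (i + 1)
  else (cp, regs)
termination_by cs.length - i
decreasing_by
  · have := pvFindStopA_bounds cs (i + 3) j hj; omega
  · have := pvFindStopA_bounds cs (i + 3) j hj; omega
  · omega

def get_coding_and_non_coding_regions_positions (seq : String) : List Int × (List (Int × Int)) :=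
  pvLoopA seq.toList (List.replicate seq.toList.length (0 : Int)) [] 0

-- ===== PORT B =====
-- pass 1: 'for p in range(N-3, -1, -1): next_stop[p] = p if stop else next_stop[p+3]'
-- (positions are nonnegative, so the table is indexed by Nat)
def pvNextStop (cs : List Char) : List (Option Nat) :=
  ((List.range (cs.length - 2)).reverse).foldl
    (fun ns p =>
      if pvSlice3 cs p ∈ pvStops then ns.set p (some p)
      else ns.set p (ns.getD (p + 3) none))
    (List.replicate (cs.length + 3) none)

-- pass 2: 'for s in range(N - 2): if s < i or seq[s:s+3] != "ATG": continue; …'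
def pvDetectB (cs : List Char) (ns : List (Option Nat)) (i : Nat) (regs : List (Int × Int))
    (s : Nat) : List (Int × Int) :=
  if s + 2 < cs.length then
    if s < i ∨ ¬ (pvSlice3 cs s = ['A','T','G']) then pvDetectB cs ns i regs (s + 1)
    else
      match ns.getD (s + 3) none with
      | none => regs
      | some q =>
          pvDetectB cs ns (q + 3)
            (if 21 ≤ (q + 3) - s then regs ++ [((s : Int), ((q + 3 : Nat) : Int))] else regs)
            (s + 1)
  else regs
termination_by cs.length - s
decreasing_by all_goals omega

-- pass 3 body: 'for k in range(s, e): codon_positions[k] = (k-s)%3+1' then the -3 overwrite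
def pvMarkB (cp : List Int) (s e : Nat) : List Int :=
  ((List.range' s (e - s)).foldl
    (fun acc (k : Nat) => acc.set k (((k : Int) - (s : Int)) % 3 + 1)) cp).set (s + 2) (-3)

-- region endpoints are nonnegative by construction, so .toNat below is exact
def get_coding_and_non_coding_regions_positions_alt (seq : String) : List Int × (List (Int × Int)) :=
  ((pvDetectB seq.toList (pvNextStop seq.toList) 0 [] 0).foldl
      (fun cp r => pvMarkB cp r.1.toNat r.2.toNat) (List.replicate seq.toList.length (0 : Int)),
   pvDetectB seq.toList (pvNextStop seq.toList) 0 [] 0)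

-- ===== PRECONDITION & SPEC =====
def Spec_get_coding_and_non_coding_regions_positions (seq : String) (out : List Int × (List (Int × Int))) : Prop := out = get_coding_and_non_coding_regions_positions_alt seq
instance (seq : String) (out : List Int × (List (Int × Int))) : Decidable (Spec_get_coding_and_non_coding_regions_positions seq out) := by unfold Spec_get_coding_and_non_coding_regions_positions; infer_instance

-- ===== CLAIM (what is proved, stated in full; the proofs are below) =====
def Claim_equal_get_coding_and_non_coding_regions_positions : Prop := ∀ (seq : String), Dom_get_coding_and_non_coding_regions_positions seq → Spec_get_coding_and_non_coding_regions_positions seq (get_coding_and_non_coding_regions_positions seq)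

-- ===== LEMMAS AND PROOFS =====

-- A's detection behaviour, regions only (proof-side restatement of pvLoopA's scan)
def pvScanA (cs : List Char) (i : Nat) : List (Int × Int) :=
  if i + 2 < cs.length then
    if pvSlice3 cs i = ['A','T','G'] then
      match hj : pvFindStopA cs (i + 3) with
      | some j =>
          (if 21 ≤ (j + 3) - i then [((i : Int), ((j + 3 : Nat) : Int))] else [])
            ++ pvScanA cs (j + 3)
      | none => []
    else pvScanA cs (i + 1)
  else []
termination_by cs.length - i
decreasing_by
  · have := pvFindStopA_bounds cs (i + 3) j hj; omega
  · omega

-- the marking fold of A's regions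
def pvFoldA (cp : List Int) (regs : List (Int × Int)) : List Int :=
  regs.foldl (fun cp r => pvMarkA cp r.1.toNat r.2.toNat) cp


-- unfold lemmas for pvScanA's dependent match
theorem pvScanA_some (cs : List Char) (i j : Nat) (h1 : i + 2 < cs.length)
    (h2 : pvSlice3 cs i = ['A','T','G']) (hj : pvFindStopA cs (i + 3) = some j) :
    pvScanA cs i = (if 21 ≤ (j + 3) - i then [((i : Int), ((j + 3 : Nat) : Int))] else [])
      ++ pvScanA cs (j + 3) := by
  rw [pvScanA, if_pos h1, if_pos h2]
  split
  next j' hj' => rw [hj] at hj'; cases hj'; rfl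
  next hj' => rw [hj] at hj'; cases hj'

theorem pvScanA_none (cs : List Char) (i : Nat) (h1 : i + 2 < cs.length)
    (h2 : pvSlice3 cs i = ['A','T','G']) (hj : pvFindStopA cs (i + 3) = none) :
    pvScanA cs i = [] := by
  rw [pvScanA, if_pos h1, if_pos h2]
  split
  next j' hj' => rw [hj] at hj'; cases hj'
  next hj' => rfl

-- 1. pvLoopA factored into scan + marking fold
theorem pvLoopA_factor (cs : List Char) (cp : List Int) (regs : List (Int × Int)) (i : Nat) :
    pvLoopA cs cp regs i = (pvFoldA cp (pvScanA cs i), regs ++ pvScanA cs i) := by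
  generalize hk : cs.length - i = k
  induction k using Nat.strong_induction_on generalizing i cp regs with
  | _ k IH =>
    subst hk
    rw [pvLoopA]
    by_cases h1 : i + 2 < cs.length
    · simp only [if_pos h1]
      by_cases h2 : pvSlice3 cs i = ['A','T','G']
      · simp only [if_pos h2]
        split
        next j hj =>
          have hb := pvFindStopA_bounds cs (i + 3) j hj
          rw [pvScanA_some cs i j h1 h2 hj]
          by_cases hc : 21 ≤ (j + 3) - i
          · rw [if_pos hc, if_pos hc, IH (cs.length - (j + 3)) (by omega) _ _ (j + 3) rfl]
            simp only [pvFoldA, List.singleton_append, List.foldl_cons, Int.toNat_natCast,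
              List.append_assoc]
          · rw [if_neg hc, if_neg hc, IH (cs.length - (j + 3)) (by omega) _ _ (j + 3) rfl]
            simp
        next hj =>
          rw [pvScanA_none cs i h1 h2 hj]; simp [pvFoldA]
      · simp only [if_neg h2]
        have hS : pvScanA cs i = pvScanA cs (i + 1) := by
          rw [pvScanA]; simp [h1, h2]
        rw [hS, IH (cs.length - (i + 1)) (by omega) _ _ (i + 1) rfl]
    · simp only [if_neg h1]
      have hS : pvScanA cs i = [] := by rw [pvScanA]; simp [h1]
      rw [hS]; simp [pvFoldA]

-- 2a. the table fold, with the processed prefix generalised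
theorem pvNextStop_aux (cs : List Char) :
    ∀ (k : Nat) (T : List (Option Nat)), T.length = cs.length + 3 → k ≤ cs.length - 2 →
    (∀ p, k ≤ p → p < cs.length + 3 → T.getD p none = pvFindStopA cs p) →
    ∀ p, p < cs.length + 3 →
    (((List.range k).reverse).foldl
      (fun ns p =>
        if pvSlice3 cs p ∈ pvStops then ns.set p (some p)
        else ns.set p (ns.getD (p + 3) none)) T).getD p none = pvFindStopA cs p := by
  intro k
  induction k with
  | zero =>
      intro T hlen _ hinv p hp
      simpa using hinv p (Nat.zero_le p) hp
  | succ k ih =>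
      intro T hlen hk hinv p hp
      rw [List.range_succ, List.reverse_append, List.reverse_singleton, List.singleton_append,
        List.foldl_cons]
      have hk3 : k + 2 < cs.length := by omega
      have hkT : k < T.length := by omega
      refine ih _ ?_ (by omega) ?_ p hp
      · split_ifs <;> simp [hlen]
      · intro p' hp1 hp2
        by_cases hpk : p' = k
        · subst hpk
          rw [pvFindStopA, if_pos hk3]
          split_ifs with hstop
          · simp [List.getD_eq_getElem?_getD, List.getElem?_set_self hkT]
          · simp only [List.getD_eq_getElem?_getD, List.getElem?_set_self hkT, Option.getD_some]
            have := hinv (p' + 3) (by omega) (by omega)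
            simpa [List.getD_eq_getElem?_getD] using this
        · have hne : k ≠ p' := fun h => hpk h.symm
          have : ∀ v : Option Nat, (T.set k v).getD p' none = T.getD p' none := by
            intro v
            simp [List.getD_eq_getElem?_getD, List.getElem?_set_ne hne]
          split_ifs <;> rw [this] <;> exact hinv p' (by omega) hp2

-- 2b. the suffix table computes exactly A's stop search
theorem pvNextStop_spec (cs : List Char) (p : Nat) (hp : p < cs.length + 3) :
    (pvNextStop cs).getD p none = pvFindStopA cs p := by
  unfold pvNextStop
  refine pvNextStop_aux cs (cs.length - 2) _ (by simp) (le_refl _) ?_ p hp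
  intro p' hp1 hp2
  rw [pvFindStopA, if_neg (by omega)]
  simp [List.getD_eq_getElem?_getD]

-- 3a. the threshold is irrelevant once the cursor has passed it
theorem pvDetectB_thresh (cs : List Char) (ns : List (Option Nat)) (s i i' : Nat)
    (regs : List (Int × Int)) (h : i ≤ s) (h' : i' ≤ s) :
    pvDetectB cs ns i regs s = pvDetectB cs ns i' regs s := by
  generalize hk : cs.length - s = k
  induction k using Nat.strong_induction_on generalizing s regs with
  | _ k IH =>
    subst hk
    conv_lhs => rw [pvDetectB]
    conv_rhs => rw [pvDetectB]
    by_cases h1 : s + 2 < cs.length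
    · simp only [if_pos h1]
      have hi : ¬ (s < i) := by omega
      have hi' : ¬ (s < i') := by omega
      by_cases h2 : pvSlice3 cs s = ['A','T','G']
      · simp only [hi, hi', h2, not_true_eq_false, or_false, if_false]
      · simp only [hi, hi', h2, not_false_eq_true, or_true, if_true]
        exact IH (cs.length - (s + 1)) (by omega) (s + 1) regs (by omega) (by omega) rfl
    · simp only [if_neg h1]

-- 3b. the cursor skips straight to the threshold
theorem pvDetectB_skip (cs : List Char) (ns : List (Option Nat)) (i s : Nat)
    (regs : List (Int × Int)) (h : s ≤ i) :
    pvDetectB cs ns i regs s = pvDetectB cs ns i regs i := by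
  generalize hk : i - s = k
  induction k using Nat.strong_induction_on generalizing s with
  | _ k IH =>
    subst hk
    by_cases hsi : s = i
    · rw [hsi]
    · have hlt : s < i := by omega
      rw [pvDetectB]
      by_cases h1 : s + 2 < cs.length
      · simp only [if_pos h1, hlt, true_or, if_true]
        exact IH (i - (s + 1)) (by omega) (s + 1) (by omega) rfl
      · rw [if_neg h1]
        rw [pvDetectB, if_neg (by omega)]

-- 3c. B's flat detection loop equals A's scan
theorem pvDetectB_eq_scanA (cs : List Char) (i : Nat) (regs : List (Int × Int)) :
    pvDetectB cs (pvNextStop cs) i regs i = regs ++ pvScanA cs i := by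
  generalize hk : cs.length - i = k
  induction k using Nat.strong_induction_on generalizing i regs with
  | _ k IH =>
    subst hk
    rw [pvDetectB]
    by_cases h1 : i + 2 < cs.length
    · simp only [if_pos h1]
      by_cases h2 : pvSlice3 cs i = ['A','T','G']
      · simp only [lt_irrefl, h2, not_true_eq_false, or_false, if_false]
        rw [pvNextStop_spec cs (i + 3) (by omega)]
        split
        next hj =>
          rw [pvScanA_none cs i h1 h2 hj]; simp
        next q hj =>
          have hb := pvFindStopA_bounds cs (i + 3) q hj
          rw [pvDetectB_skip cs _ (q + 3) _ _ (by omega),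
            IH (cs.length - (q + 3)) (by omega) (q + 3) _ rfl,
            pvScanA_some cs i q h1 h2 hj]
          split_ifs <;> simp
      · simp only [lt_irrefl, h2, not_false_eq_true, or_true, if_true]
        have hS : pvScanA cs i = pvScanA cs (i + 1) := by
          rw [pvScanA]; simp [h1, h2]
        rw [pvDetectB_thresh cs _ (i + 1) i (i + 1) regs (by omega) (by omega),
          IH (cs.length - (i + 1)) (by omega) (i + 1) regs rfl, hS]
    · simp only [if_neg h1]
      have hS : pvScanA cs i = [] := by rw [pvScanA]; simp [h1]
      rw [hS]; simp

-- 4. every region A's scan produces is a well-shaped pair of Nat casts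
theorem pvScanA_wf (cs : List Char) (i : Nat) :
    ∀ r ∈ pvScanA cs i, ∃ sN eN : Nat, r = ((sN : Int), (eN : Int)) ∧
      sN + 3 ≤ eN ∧ eN ≤ cs.length ∧ (eN - sN) % 3 = 0 ∧ 21 ≤ eN - sN := by
  generalize hk : cs.length - i = k
  induction k using Nat.strong_induction_on generalizing i with
  | _ k IH =>
    subst hk
    rw [pvScanA]
    by_cases h1 : i + 2 < cs.length
    · simp only [if_pos h1]
      by_cases h2 : pvSlice3 cs i = ['A','T','G']
      · simp only [if_pos h2]
        split
        next j hj =>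
          have hb := pvFindStopA_bounds cs (i + 3) j hj
          intro r hr
          rw [List.mem_append] at hr
          rcases hr with hr | hr
          · by_cases hc : 21 ≤ (j + 3) - i
            · rw [if_pos hc, List.mem_singleton] at hr
              exact ⟨i, j + 3, hr, by omega, by omega, by omega, by omega⟩
            · rw [if_neg hc] at hr; simp at hr
          · exact IH (cs.length - (j + 3)) (by omega) (j + 3) rfl r hr
        next hj => simp
      · simp only [if_neg h2]
        exact IH (cs.length - (i + 1)) (by omega) (i + 1) rfl
    · simp only [if_neg h1]; simp

-- setting one position, seen as take/append
theorem take_set_succ (l : List Int) (n : Nat) (a : Int) (h : n < l.length) :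
    (l.set n a).take (n + 1) = l.take n ++ [a] := by
  rw [List.set_eq_take_append_cons_drop, if_pos h, List.take_append]
  simp [Nat.le_of_lt h]

-- closed form for a fold of positional writes
theorem foldl_set_range' (g : Nat → Int) :
    ∀ (m s : Nat) (cp : List Int), s + m ≤ cp.length →
    (List.range' s m).foldl (fun acc k => acc.set k (g k)) cp
      = cp.take s ++ (List.range' s m).map g ++ cp.drop (s + m) := by
  intro m
  induction m with
  | zero => intro s cp h; simp
  | succ m ih =>
      intro s cp h
      rw [List.range'_succ, List.foldl_cons, List.map_cons]
      rw [ih (s + 1) (cp.set s (g s)) (by simpa using by omega)]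
      rw [List.drop_set_of_lt (by omega : s < s + 1 + m), take_set_succ _ _ _ (by omega)]
      have h1 : s + 1 + m = s + (m + 1) := by omega
      rw [h1]
      simp

-- the per-position value A writes
def pvG (s k : Nat) : Int :=
  if k - s < 3 ∧ ((k : Int) - (s : Int)) % 3 + 1 = 3 then -3 else ((k : Int) - (s : Int)) % 3 + 1

-- B's plain phase map, patched at index 2, is A's conditional phase map
theorem map_set_eq_map_pvG (s m : Nat) :
    ((List.range' s m).map (fun (k : Nat) => ((k : Int) - (s : Int)) % 3 + 1)).set 2 (-3)
      = (List.range' s m).map (pvG s) := by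
  apply List.ext_getElem
  · simp
  · intro n hn hn'
    simp only [List.length_set, List.length_map, List.length_range'] at hn
    rw [List.getElem_set (by simpa using hn)]
    simp only [List.getElem_map, List.getElem_range'_1]
    by_cases h2 : 2 = n
    · subst h2
      rw [if_pos rfl]
      simp only [pvG]
      rw [if_pos (by constructor; omega; push_cast; omega)]
    · rw [if_neg h2]
      simp only [pvG]
      rw [if_neg (by push_cast; omega)]

-- 5. the two per-region markings agree on well-shaped regions
theorem pvMark_eq (cp : List Int) (s e : Nat) (h3 : s + 3 ≤ e) (hN : e ≤ cp.length)
    (hm : (e - s) % 3 = 0) (hl : 21 ≤ e - s) :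
    pvMarkA cp s e = pvMarkB cp s e := by
  unfold pvMarkA pvMarkB
  have hfun : (fun (acc : List Int) (k : Nat) =>
      let phase : Int := ((k : Int) - (s : Int)) % 3 + 1
      if k - s < 3 ∧ phase = 3 then acc.set k (-3) else acc.set k phase)
      = fun acc k => acc.set k (pvG s k) := by
    funext acc k
    simp only [pvG]
    split_ifs <;> rfl
  rw [hfun, foldl_set_range' (pvG s) (e - s) s cp (by omega),
    foldl_set_range' (fun (k : Nat) => ((k : Int) - (s : Int)) % 3 + 1) (e - s) s cp (by omega)]
  have hts : (cp.take s).length = s := by rw [List.length_take]; omega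
  rw [List.append_assoc, List.append_assoc,
    List.set_append_right _ _ (by omega : (cp.take s).length ≤ s + 2), hts,
    List.set_append_left _ _ (by simp; omega),
    show s + 2 - s = 2 from by omega, map_set_eq_map_pvG s (e - s)]

theorem pvMarkA_length (cp : List Int) (s e : Nat) (h3 : s + 3 ≤ e) (hN : e ≤ cp.length) :
    (pvMarkA cp s e).length = cp.length := by
  unfold pvMarkA
  have hfun : (fun (acc : List Int) (k : Nat) =>
      let phase : Int := ((k : Int) - (s : Int)) % 3 + 1
      if k - s < 3 ∧ phase = 3 then acc.set k (-3) else acc.set k phase)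
      = fun acc k => acc.set k (pvG s k) := by
    funext acc k
    simp only [pvG]
    split_ifs <;> rfl
  rw [hfun, foldl_set_range' (pvG s) (e - s) s cp (by omega)]
  simp only [List.length_append, List.length_take, List.length_map, List.length_range',
    List.length_drop]
  omega

-- 6. hence the two marking folds agree
theorem pvFold_eq (cs : List Char) :
    ∀ (regs : List (Int × Int)) (cp : List Int), cp.length = cs.length →
    (∀ r ∈ regs, ∃ sN eN : Nat, r = ((sN : Int), (eN : Int)) ∧
      sN + 3 ≤ eN ∧ eN ≤ cs.length ∧ (eN - sN) % 3 = 0 ∧ 21 ≤ eN - sN) →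
    pvFoldA cp regs = regs.foldl (fun cp r => pvMarkB cp r.1.toNat r.2.toNat) cp := by
  intro regs
  induction regs with
  | nil => intro cp _ _; rfl
  | cons r t ih =>
      intro cp hcp hwf
      obtain ⟨sN, eN, hr, h3, hNb, hm, hl⟩ := hwf r (List.mem_cons_self)
      subst hr
      unfold pvFoldA
      rw [List.foldl_cons, List.foldl_cons]
      simp only [Int.toNat_natCast]
      rw [pvMark_eq cp sN eN h3 (by omega) hm hl]
      have hlen : (pvMarkB cp sN eN).length = cs.length := by
        rw [← pvMark_eq cp sN eN h3 (by omega) hm hl,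
          pvMarkA_length cp sN eN h3 (by omega)]
        exact hcp
      exact ih (pvMarkB cp sN eN) hlen (fun r hr => hwf r (List.mem_cons_of_mem _ hr))

-- ===== VERDICT (by name: the statement is the Claim_ definition above) =====
theorem get_coding_and_non_coding_regions_positions_spec : Claim_equal_get_coding_and_non_coding_regions_positions := by
  intro seq _
  unfold Spec_get_coding_and_non_coding_regions_positions
  unfold get_coding_and_non_coding_regions_positions get_coding_and_non_coding_regions_positions_alt
  rw [pvLoopA_factor, pvDetectB_eq_scanA]
  simp only [List.nil_append]
  rw [pvFold_eq seq.toList (pvScanA seq.toList 0) _ (by simp) (pvScanA_wf seq.toList 0)]
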